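-- pv_equiv track=rewrite | github.com/wzygxr/shuati | class121_Greedy/Code06_AbsoluteValueAddToArray.py | len2
-- ===== SOURCE A (Python) =====
-- import math
-- from collections import Counter
--
-- def gcd(a, b):
--     """
--     计算两个数的最大公约数
--
--     Args:
--         a: 第一个数
--         b: 第二个数
--
--     Returns:
--         最大公约数
--     """
--     return math.gcd(a, b)
--
-- def len2(arr):
--     """
--     正式方法（优化解法）
--
--     Args:
--         arr: 输入数组
--
--     Returns:
--         最终数组的长度
--     """
--     if not arr:
--         return 0
--
--     max_val = max(arr)
--
--     # 找到任意一个非0的值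
--     gcd_val = 0
--     for num in arr:
--         if num != 0:
--             gcd_val = num
--             break
--
--     if gcd_val == 0:  # 数组中都是0
--         return len(arr)
--
--     # 不都是0
--     cnts = Counter(arr)
--
--     for num in arr:
--         if num != 0:
--             gcd_val = gcd(gcd_val, num)
--
--     ans = max_val // gcd_val
--     max_cnt = 0
--
--     for key, count in cnts.items():
--         if key != 0:
--             ans += count - 1
--         max_cnt = max(max_cnt, count)
--
--     ans += cnts.get(0, 1 if max_cnt > 1 else 0)
--
--     return ans
-- ===== SOURCE B (Python) =====
-- import math
-- from functools import reduce
--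
-- def len2(arr):
--     if not arr:
--         return 0
--     s = sorted(arr)
--     g = reduce(math.gcd, s, 0)
--     if g == 0:
--         return len(s)
--     # duplicates are adjacent in a sorted list
--     dups = [a for a, b in zip(s, s[1:]) if a == b]
--     zeros = s.count(0)
--     extra = zeros if zeros else (1 if dups else 0)
--     return s[-1] // g + sum(1 for d in dups if d != 0) + extra
-- ===== Notes on version B (the rewrite author's own statement) =====
-- stated objective: alternative
-- what changed: B sorts the array once and reads everything off the sorted list in linear scans (gcd fold, last element as max, adjacent-equal pairs as duplicate count, count of zeros), with no Counter/hash table at all, whereas A builds a Counter and iterates its key/count items with interleaved accumulators.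
import Mathlib
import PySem

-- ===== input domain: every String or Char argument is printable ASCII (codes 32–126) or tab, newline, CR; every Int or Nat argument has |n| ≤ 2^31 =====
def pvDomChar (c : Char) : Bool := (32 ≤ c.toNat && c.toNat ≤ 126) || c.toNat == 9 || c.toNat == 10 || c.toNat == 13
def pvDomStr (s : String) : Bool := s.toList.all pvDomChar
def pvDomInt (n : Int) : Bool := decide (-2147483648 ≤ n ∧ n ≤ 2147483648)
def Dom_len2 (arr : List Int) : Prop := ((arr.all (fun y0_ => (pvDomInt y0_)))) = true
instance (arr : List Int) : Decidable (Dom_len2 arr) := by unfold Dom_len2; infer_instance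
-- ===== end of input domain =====

-- B sorts the array once and reads everything off the sorted list (gcd fold, last element as
-- max, adjacent-equal pairs as duplicates, count of zeros) instead of A's Counter; objective: alternative.

-- ===== PORT A =====
-- 'for num in arr: if num != 0: gcd_val = num; break'
def firstNZ : List Int → Int
  | [] => 0
  | x :: xs => if x ≠ 0 then x else firstNZ xs

def len2 (arr : List Int) : Int :=
  if arr = [] then 0
  else
    let maxVal := (PySem.List.max? arr (fun x => x)).getD 0  -- max(arr), arr nonempty here
    let gcdVal := firstNZ arr
    if gcdVal = 0 then (arr.length : Int)
    else
      let cnts := PySem.Dict.counter arr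
      let gcdVal := arr.foldl (fun g num => if num ≠ 0 then ((Int.gcd g num : Int)) else g) gcdVal
      let ans := PySem.Int.floordiv maxVal gcdVal
      let st := cnts.items.foldl
        (fun (s : Int × Int) p =>
          ((if p.1 ≠ 0 then s.1 + p.2 - 1 else s.1), max s.2 p.2)) (ans, 0)
      st.1 + cnts.getD 0 (if st.2 > 1 then 1 else 0)

-- ===== PORT B =====
-- '[a for a, b in zip(s, s[1:]) if a == b]'
def dupList (s : List Int) : List Int :=
  (s.zip s.tail).filterMap (fun p => if p.1 = p.2 then some p.1 else none)

def len2_alt (arr : List Int) : Int :=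
  if arr = [] then 0
  else
    let s := PySem.List.sorted arr (fun x => x) false
    let g := s.foldl (fun a x => ((Int.gcd a x : Int))) 0
    if g = 0 then (s.length : Int)
    else
      let dups := dupList s
      let zeros : Int := (PySem.List.count s 0 : Int)
      let extra := if zeros ≠ 0 then zeros else (if dups ≠ [] then 1 else 0)
      PySem.Int.floordiv ((PySem.List.pyGet? s (-1)).getD 0) g
        + (dups.countP (fun d => d != 0) : Int) + extra

-- ===== PRECONDITION & SPEC =====
def Spec_len2 (arr : List Int) (out : Int) : Prop := out = len2_alt arr
instance (arr : List Int) (out : Int) : Decidable (Spec_len2 arr out) := by unfold Spec_len2; infer_instance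

-- ===== CLAIM (what is proved, stated in full; the proofs are below) =====
def Claim_equal_len2 : Prop := ∀ (arr : List Int), Dom_len2 arr → Spec_len2 arr (len2 arr)

-- ===== LEMMAS AND PROOFS =====

theorem firstNZ_mem (l : List Int) (h : firstNZ l ≠ 0) : firstNZ l ∈ l ∧ firstNZ l ≠ 0 := by
  induction l with
  | nil => simp [firstNZ] at h
  | cons x xs ih =>
    by_cases hx : x = 0
    · have hfz : firstNZ (x :: xs) = firstNZ xs := by simp [firstNZ, hx]
      rw [hfz] at h ⊢
      exact ⟨List.mem_cons_of_mem _ (ih h).1, (ih h).2⟩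
    · have hfz : firstNZ (x :: xs) = x := by simp [firstNZ, hx]
      rw [hfz]
      exact ⟨List.mem_cons_self, hx⟩

theorem firstNZ_eq_zero (l : List Int) (h : firstNZ l = 0) : ∀ x ∈ l, x = 0 := by
  induction l with
  | nil => simp
  | cons x xs ih =>
    by_cases hx : x = 0
    · have hfz : firstNZ (x :: xs) = firstNZ xs := by simp [firstNZ, hx]
      rw [hfz] at h
      intro y hy
      rcases List.mem_cons.mp hy with h1 | h2
      · exact h1 ▸ hx
      · exact ih h y h2
    · have hfz : firstNZ (x :: xs) = x := by simp [firstNZ, hx]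
      exact absurd (hfz ▸ h) hx

theorem firstNZ_zero_of_all (l : List Int) (h : ∀ x ∈ l, x = 0) : firstNZ l = 0 := by
  induction l with
  | nil => rfl
  | cons x xs ih =>
    have hx : x = 0 := h x List.mem_cons_self
    simp [firstNZ, hx]
    exact ih (fun y hy => h y (List.mem_cons_of_mem _ hy))

theorem dvd_gcdFold (l : List Int) (a d : Int) :
    d ∣ l.foldl (fun g x => ((Int.gcd g x : Int))) a ↔ d ∣ a ∧ ∀ x ∈ l, d ∣ x := by
  induction l generalizing a with
  | nil => simp
  | cons x xs ih =>
    simp only [List.foldl_cons, ih, List.mem_cons]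
    constructor
    · rintro ⟨hd, hall⟩
      exact ⟨dvd_trans hd (Int.gcd_dvd_left a x),
        fun y hy => hy.elim (fun he => he ▸ dvd_trans hd (Int.gcd_dvd_right a x)) (hall y)⟩
    · rintro ⟨ha, hall⟩
      exact ⟨Int.dvd_coe_gcd ha (hall x (Or.inl rfl)), fun y hy => hall y (Or.inr hy)⟩

theorem gcdFold_nonneg_of_nonneg (l : List Int) (a : Int) (ha : 0 ≤ a) :
    0 ≤ l.foldl (fun g x => ((Int.gcd g x : Int))) a := by
  induction l generalizing a with
  | nil => simpa
  | cons x xs ih => exact ih _ (Int.natCast_nonneg _)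

theorem gcdFold_nonneg_of_ne_nil (l : List Int) (a : Int) (h : l ≠ []) :
    0 ≤ l.foldl (fun g x => ((Int.gcd g x : Int))) a := by
  cases l with
  | nil => exact absurd rfl h
  | cons x xs => exact gcdFold_nonneg_of_nonneg xs _ (Int.natCast_nonneg _)

theorem gcdFold_eq_zeroInit (l1 l2 : List Int) (a1 : Int)
    (ha1 : a1 ∈ l2) (h12 : ∀ x ∈ l1, x ∈ l2) (h21 : ∀ x ∈ l2, x ∈ l1) (hne : l1 ≠ []) :
    l1.foldl (fun g x => ((Int.gcd g x : Int))) a1 = l2.foldl (fun g x => ((Int.gcd g x : Int))) 0 := by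
  have hne2 : l2 ≠ [] := fun h => by subst h; exact (List.not_mem_nil ha1).elim
  have c1 := (dvd_gcdFold l1 a1 (l1.foldl (fun g x => ((Int.gcd g x : Int))) a1)).mp dvd_rfl
  have c2 := (dvd_gcdFold l2 0 (l2.foldl (fun g x => ((Int.gcd g x : Int))) 0)).mp dvd_rfl
  exact Int.dvd_antisymm (gcdFold_nonneg_of_ne_nil l1 a1 hne) (gcdFold_nonneg_of_ne_nil l2 0 hne2)
    ((dvd_gcdFold l2 0 _).mpr ⟨dvd_zero _, fun x hx => c1.2 x (h21 x hx)⟩)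
    ((dvd_gcdFold l1 a1 _).mpr ⟨c2.2 a1 ha1, fun x hx => c2.2 x (h12 x hx)⟩)

-- gcd fold from 0 only depends on which divisibility constraints the elements impose
theorem gcdFold_zero_congr (l1 l2 : List Int)
    (h : ∀ d : Int, (∀ x ∈ l1, d ∣ x) ↔ (∀ x ∈ l2, d ∣ x)) :
    l1.foldl (fun g x => ((Int.gcd g x : Int))) 0 = l2.foldl (fun g x => ((Int.gcd g x : Int))) 0 := by
  have c1 := (dvd_gcdFold l1 0 (l1.foldl (fun g x => ((Int.gcd g x : Int))) 0)).mp dvd_rfl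
  have c2 := (dvd_gcdFold l2 0 (l2.foldl (fun g x => ((Int.gcd g x : Int))) 0)).mp dvd_rfl
  exact Int.dvd_antisymm (gcdFold_nonneg_of_nonneg l1 0 le_rfl) (gcdFold_nonneg_of_nonneg l2 0 le_rfl)
    ((dvd_gcdFold l2 0 _).mpr ⟨dvd_zero _, fun x hx => ((h _).mp c1.2) x hx⟩)
    ((dvd_gcdFold l1 0 _).mpr ⟨dvd_zero _, fun x hx => ((h _).mpr c2.2) x hx⟩)

-- in a ≤-sorted list every element is ≤ the last one
theorem le_getLast (s : List Int) (hne : s ≠ []) (hs : s.Pairwise (· ≤ ·)) :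
    ∀ y ∈ s, y ≤ s.getLast hne := by
  induction s with
  | nil => exact absurd rfl hne
  | cons a t ih =>
    rcases List.pairwise_cons.mp hs with ⟨ha, ht⟩
    intro y hy
    cases t with
    | nil => simp at hy; simp [hy, List.getLast]
    | cons b t' =>
      have hlast : (a :: b :: t').getLast (by simp) = (b :: t').getLast (by simp) := by
        simp [List.getLast]
      rw [hlast]
      rcases List.mem_cons.mp hy with rfl | hy'
      · exact ha _ (List.getLast_mem _)
      · exact ih (by simp) ht y hy'

theorem dupList_cons₂ (a b : Int) (t : List Int) :
    dupList (a :: b :: t) = (if a = b then a :: dupList (b :: t) else dupList (b :: t)) := by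
  by_cases h : a = b <;> simp [dupList, h]

-- For a ≤-sorted list: duplicates plus distinct values account for all elements (per predicate p)
theorem dup_count (p : Int → Bool) (s : List Int) (hs : s.Pairwise (· ≤ ·)) :
    (dupList s).countP p + (s.dedup).countP p = s.countP p := by
  induction s with
  | nil => simp [dupList]
  | cons a t ih =>
    rcases List.pairwise_cons.mp hs with ⟨ha, ht⟩
    cases t with
    | nil => simp [dupList, List.dedup]
    | cons b t' =>
      have iht := ih ht
      by_cases hab : a = b
      · have hmem : a ∈ b :: t' := by simp [hab]
        rw [dupList_cons₂, if_pos hab, List.dedup_cons_of_mem hmem]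
        simp only [List.countP_cons] at iht ⊢
        omega
      · have hnmem : a ∉ b :: t' := by
          intro hmem
          rcases List.mem_cons.mp hmem with rfl | hmem'
          · exact hab rfl
          · have h1 : a ≤ b := ha b List.mem_cons_self
            have h2 : b ≤ a := (List.pairwise_cons.mp ht).1 a hmem'
            exact hab (le_antisymm h1 h2)
        rw [dupList_cons₂, if_neg hab, List.dedup_cons_of_notMem hnmem]
        simp only [List.countP_cons] at iht ⊢
        omega

-- sum of multiplicities over the distinct values is the length
theorem sum_count_dedup (m : List Int) :
    ((m.dedup).map (fun k => List.count k m)).sum = m.length := by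
  have h1 : m.dedup.toFinset = (m : Multiset Int).toFinset := by
    ext a; simp
  have h2 := List.sum_toFinset (fun k => List.count k m) (List.nodup_dedup m)
  rw [h1] at h2
  rw [← h2]
  simp

theorem sum_map_intCast (l : List Int) (f : Int → Nat) :
    (l.map (fun x => ((f x : Int)))).sum = (((l.map f).sum : Nat) : Int) := by
  induction l with
  | nil => simp
  | cons x xs ih => simp [ih]

-- two nodup lists with the same members are permutations
theorem perm_of_nodup_mem_iff (l1 l2 : List Int) (h1 : l1.Nodup) (h2 : l2.Nodup)
    (h : ∀ x, x ∈ l1 ↔ x ∈ l2) : l1.Perm l2 := by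
  refine List.perm_of_nodup_nodup_toFinset_eq h1 h2 ?_
  ext a; simp [h a]

theorem getD_counter_default (arr : List Int) (d : Int) :
    (PySem.Dict.counter arr).getD 0 d = if (0:Int) ∈ arr then ((List.count 0 arr : Int)) else d := by
  by_cases h : (0:Int) ∈ arr
  · rw [if_pos h]
    have hc := PySem.Dict.getD_counter arr (0:Int)
    have hpos : 0 < List.count (0:Int) arr := List.count_pos_iff.mpr h
    unfold PySem.Dict.getD at hc ⊢
    cases hg : (PySem.Dict.counter arr).get? 0 with
    | none =>
      rw [hg] at hc
      simp at hc
      omega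
    | some v =>
      rw [hg] at hc
      simpa using hc
  · rw [if_neg h]
    have hc := PySem.Dict.contains_counter arr (0:Int)
    have hcf : arr.contains (0:Int) = false := by simpa using h
    rw [hcf] at hc
    unfold PySem.Dict.contains at hc
    unfold PySem.Dict.getD PySem.Dict.get?
    have hfind : (PySem.Dict.counter arr).items.find? (fun p => p.1 == 0) = none := by
      rw [List.find?_eq_none]
      intro x hx hbeq
      have : (PySem.Dict.counter arr).items.any (fun p => p.1 == 0) = true :=
        List.any_eq_true.mpr ⟨x, hx, hbeq⟩
      rw [this] at hc
      exact Bool.true_eq_false.mp hc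
    rw [hfind]
    rfl

-- 1 < running max of the multiplicities  ↔  some element repeats
theorem maxcnt_gt_one_iff (arr : List Int) :
    (1 < (PySem.List.max? ((PySem.Set.ofList arr).map (fun k => (arr.count k : Int)))
        (fun x => x)).getD 0) ↔ ¬ arr.Nodup := by
  constructor
  · intro h
    rcases e : PySem.List.max? ((PySem.Set.ofList arr).map (fun k => (arr.count k : Int)))
        (fun x => x) with _ | m
    · rw [e] at h; simp at h
    · rw [e] at h
      simp only [Option.getD_some] at h
      have hmem := PySem.List.max?_mem e
      rcases List.mem_map.mp hmem with ⟨k, _, rfl⟩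
      intro hnd
      have hle := List.nodup_iff_count_le_one.mp hnd k
      have : (arr.count k : Int) ≤ 1 := by exact_mod_cast hle
      omega
  · intro h
    rw [List.nodup_iff_count_le_one] at h
    push Not at h
    obtain ⟨k, hk⟩ := h
    have hkmem : k ∈ arr := List.count_pos_iff.mp (by omega)
    have hv : (arr.count k : Int) ∈ (PySem.Set.ofList arr).map (fun k => (arr.count k : Int)) :=
      List.mem_map.mpr ⟨k, (PySem.Set.mem_ofList arr k).mpr hkmem, rfl⟩
    rcases e : PySem.List.max? ((PySem.Set.ofList arr).map (fun k => (arr.count k : Int)))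
        (fun x => x) with _ | m
    · rw [(PySem.List.max?_eq_none_iff _ _).mp e] at hv
      exact absurd hv (List.not_mem_nil)
    · have hle := PySem.List.max?_isMax e _ hv
      simp only [Option.getD_some]
      have : (1:Int) < (arr.count k : Int) := by exact_mod_cast hk
      exact lt_of_lt_of_le this hle

-- for a ≤-sorted list: an adjacent duplicate exists iff the list repeats an element
theorem dupList_ne_nil_iff (s : List Int) (hpw : s.Pairwise (· ≤ ·)) :
    dupList s ≠ [] ↔ ¬ s.Nodup := by
  have h := dup_count (fun _ => true) s hpw
  simp only [List.countP_true] at h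
  constructor
  · intro hne hnd
    rw [(List.dedup_eq_self).mpr hnd] at h
    have : (dupList s).length = 0 := by omega
    exact hne (List.eq_nil_of_length_eq_zero this)
  · intro hnd hnil
    rw [hnil] at h
    simp at h
    exact hnd ((List.dedup_eq_self).mp ((List.dedup_sublist s).eq_of_length h))

theorem len2_main (arr : List Int) : len2 arr = len2_alt arr := by
  by_cases hnil : arr = []
  · subst hnil; rfl
  · have hperm : (PySem.List.sorted arr (fun x => x) false).Perm arr :=
      PySem.List.sorted_perm arr _ _
    have hpw : (PySem.List.sorted arr (fun x => x) false).Pairwise (· ≤ ·) :=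
      PySem.List.sorted_pairwise arr _
    set s := PySem.List.sorted arr (fun x => x) false with hsdef
    have hsne : s ≠ [] := by
      intro h
      rw [h] at hperm
      exact hnil (List.perm_nil.mp hperm.symm)
    -- the two branch tests agree
    have hz_iff : firstNZ arr = 0 ↔ s.foldl (fun a x => ((Int.gcd a x : Int))) 0 = 0 := by
      constructor
      · intro hz
        have hall : ∀ x ∈ s, x = 0 := fun x hx => firstNZ_eq_zero arr hz x (hperm.subset hx)
        have : (0:Int) ∣ s.foldl (fun a x => ((Int.gcd a x : Int))) 0 :=
          (dvd_gcdFold s 0 0).mpr ⟨dvd_rfl, fun x hx => (hall x hx) ▸ dvd_rfl⟩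
        exact zero_dvd_iff.mp this
      · intro hg
        have hdvd := (dvd_gcdFold s 0 (0:Int)).mp (by rw [hg])
        exact firstNZ_zero_of_all arr (fun x hx =>
          zero_dvd_iff.mp (hdvd.2 x (hperm.mem_iff.mpr hx)))
    by_cases hz : firstNZ arr = 0
    · -- all zeros: both return the length
      have hgz := hz_iff.mp hz
      rw [show len2 arr = (arr.length : Int) from by simp [len2, if_neg hnil, hz]]
      rw [show len2_alt arr = (s.length : Int) from by simp [len2_alt, if_neg hnil, ← hsdef, hgz]]
      exact_mod_cast hperm.length_eq.symm
    · have hgz : ¬ s.foldl (fun a x => ((Int.gcd a x : Int))) 0 = 0 := fun h => hz (hz_iff.mpr h)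
      have hfm := firstNZ_mem arr hz
      -- shared names
      have hmemA : ∀ x, x ∈ arr.filter (fun x => decide (x ≠ 0)) ↔ (x ∈ arr ∧ x ≠ 0) := by
        intro x; simp [List.mem_filter]
      have hmemB : ∀ x, x ∈ (PySem.Set.ofList arr).filter (fun k => k != 0) ↔ (x ∈ arr ∧ x ≠ 0) := by
        intro x; simp [List.mem_filter, PySem.Set.mem_ofList, bne_iff_ne]
      have hlA_ne : arr.filter (fun x => decide (x ≠ 0)) ≠ [] := by
        intro he
        have hm := (hmemA (firstNZ arr)).mpr ⟨hfm.1, hfm.2⟩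
        rw [he] at hm
        exact List.not_mem_nil hm
      -- A's gcd loop equals the gcd fold over the distinct nonzero values
      have hgcdA : arr.foldl (fun g num => if num ≠ 0 then ((Int.gcd g num : Int)) else g) (firstNZ arr)
          = ((PySem.Set.ofList arr).filter (fun k => k != 0)).foldl (fun g x => ((Int.gcd g x : Int))) 0 := by
        rw [PySem.List.foldl_ite_eq_foldl_filter]
        exact gcdFold_eq_zeroInit _ _ _ ((hmemB _).mpr ⟨hfm.1, hfm.2⟩)
          (fun x hx => (hmemB x).mpr ((hmemA x).mp hx))
          (fun x hx => (hmemA x).mpr ((hmemB x).mp hx)) hlA_ne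
      -- B's gcd fold over the sorted list equals the same fold
      have hgcdB : s.foldl (fun a x => ((Int.gcd a x : Int))) 0
          = ((PySem.Set.ofList arr).filter (fun k => k != 0)).foldl (fun g x => ((Int.gcd g x : Int))) 0 := by
        apply gcdFold_zero_congr
        intro d
        constructor
        · intro h x hx
          exact h x (hperm.mem_iff.mpr ((hmemB x).mp hx).1)
        · intro h x hx
          by_cases hx0 : x = 0
          · exact hx0 ▸ dvd_zero d
          · exact h x ((hmemB x).mpr ⟨hperm.mem_iff.mp hx, hx0⟩)
      -- B's s[-1] is A's max
      have hlastmax : (PySem.List.pyGet? s (-1)).getD 0 = (PySem.List.max? arr (fun x => x)).getD 0 := by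
        rcases e : PySem.List.max? arr (fun x => x) with _ | m
        · exact absurd ((PySem.List.max?_eq_none_iff _ _).mp e) hnil
        · rw [PySem.List.pyGet?_neg_one, List.getLast?_eq_some_getLast hsne]
          simp only [Option.getD_some]
          exact le_antisymm
            (PySem.List.max?_isMax e _ (hperm.subset (List.getLast_mem hsne)))
            (le_getLast s hsne hpw m (hperm.mem_iff.mpr (PySem.List.max?_mem e)))
      -- duplicate bookkeeping
      have hKperm : ((PySem.Set.ofList arr).filter (fun k => k != 0)).Perm
          ((arr.filter (fun x => decide (x ≠ 0))).dedup) := by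
        apply perm_of_nodup_mem_iff
        · exact (PySem.Set.nodup_ofList arr).filter _
        · exact List.nodup_dedup _
        · intro x
          rw [hmemB, List.mem_dedup, hmemA]
      have hK2perm : ((s.dedup).filter (fun k => k != 0)).Perm
          ((arr.filter (fun x => decide (x ≠ 0))).dedup) := by
        apply perm_of_nodup_mem_iff
        · exact (List.nodup_dedup s).filter _
        · exact List.nodup_dedup _
        · intro x
          rw [List.mem_dedup, hmemA, List.mem_filter, List.mem_dedup, hperm.mem_iff, bne_iff_ne]
      -- the nonzero duplicate count
      have hdup : ((dupList s).countP (fun d => d != 0) : Int)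
          = (((PySem.Set.ofList arr).filter (fun k => k != 0)).map
              (fun k => (arr.count k : Int) - 1)).sum := by
        have hcnt := dup_count (fun d => d != 0) s hpw
        have hsP : s.countP (fun d => d != 0) = (arr.filter (fun x => decide (x ≠ 0))).length := by
          rw [hperm.countP_eq, List.countP_eq_length_filter]
          congr 1
          apply List.filter_congr
          intro x _
          simp [bne, Eq.symm (Bool.beq_eq_decide_eq x (0 : Int))]
        have hdP : (s.dedup).countP (fun d => d != 0)
            = ((arr.filter (fun x => decide (x ≠ 0))).dedup).length := by
          rw [List.countP_eq_length_filter, hK2perm.length_eq]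
        -- rewrite the A-side sum
        have hsub : (((PySem.Set.ofList arr).filter (fun k => k != 0)).map
              (fun k => (arr.count k : Int) - 1)).sum
            = (((PySem.Set.ofList arr).filter (fun k => k != 0)).map
                (fun k => (arr.count k : Int))).sum
              - (((PySem.Set.ofList arr).filter (fun k => k != 0)).length : Int) := by
          have h1 : (((PySem.Set.ofList arr).filter (fun k => k != 0)).map
                (fun k => (arr.count k : Int) - 1))
              = (((PySem.Set.ofList arr).filter (fun k => k != 0)).map
                (fun k => (arr.count k : Int) + (-1))) := by
            apply List.map_congr_left; intro x _; ring
          rw [h1, PySem.List.sum_map_add_int, PySem.List.sum_map_const_int]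
          ring
        have hsum1 : (((PySem.Set.ofList arr).filter (fun k => k != 0)).map
              (fun k => (arr.count k : Int))).sum
            = ((arr.filter (fun x => decide (x ≠ 0))).length : Int) := by
          rw [(hKperm.map _).sum_eq]
          have h2 : ((arr.filter (fun x => decide (x ≠ 0))).dedup).map (fun k => (arr.count k : Int))
              = ((arr.filter (fun x => decide (x ≠ 0))).dedup).map
                  (fun k => ((arr.filter (fun x => decide (x ≠ 0))).count k : Int)) := by
            apply List.map_congr_left
            intro x hx
            have hxq : decide (x ≠ 0) = true := (List.mem_filter.mp (List.mem_dedup.mp hx)).2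
            exact congrArg _ (List.count_filter (p := fun x => decide (x ≠ 0)) hxq).symm
          rw [h2, sum_map_intCast, sum_count_dedup]
        have hlen : (((PySem.Set.ofList arr).filter (fun k => k != 0)).length : Int)
            = (((arr.filter (fun x => decide (x ≠ 0))).dedup).length : Int) := by
          exact_mod_cast hKperm.length_eq
        rw [hsub, hsum1, hlen]
        rw [hsP, hdP] at hcnt
        omega
      -- zero counts agree
      -- A-side reductions (Counter)
      have hitems : (PySem.Dict.counter arr).items
          = (PySem.Set.ofList arr).map (fun k => (k, (arr.count k : Int))) :=
        PySem.Dict.items_counter arr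
      have hsum : ∀ X : Int, ((PySem.Set.ofList arr).map (fun k => (k, (arr.count k : Int)))).foldl
            (fun a p => if p.1 ≠ 0 then a + p.2 - 1 else a) X
          = X + (((PySem.Set.ofList arr).filter (fun k => k != 0)).map
              (fun k => (arr.count k : Int) - 1)).sum := by
        intro X
        rw [List.foldl_map, PySem.List.foldl_ite_eq_foldl_filter]
        have hfe : ((PySem.Set.ofList arr).filter fun k => decide (k ≠ 0))
            = (PySem.Set.ofList arr).filter (fun k => k != 0) := by
          apply List.filter_congr; intro x _; simp [bne, Eq.symm (Bool.beq_eq_decide_eq x (0 : Int))]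
        rw [hfe]
        have hfun2 : (fun (x : Int) (y : Int) => x + ((y, (List.count y arr : Int))).2 - 1)
            = fun (a : Int) (k : Int) => a + ((List.count k arr : Int) - 1) := by
          funext a k; ring
        rw [hfun2, PySem.List.foldl_add]
      have hS_ne : PySem.Set.ofList arr ≠ [] := by
        intro hSe
        have hm : firstNZ arr ∈ PySem.Set.ofList arr := (PySem.Set.mem_ofList _ _).mpr hfm.1
        rw [hSe] at hm
        exact List.not_mem_nil hm
      obtain ⟨k0, S', hS⟩ : ∃ k0 S', PySem.Set.ofList arr = k0 :: S' := by
        cases hSe : PySem.Set.ofList arr with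
        | nil => exact absurd hSe hS_ne
        | cons k t => exact ⟨k, t, rfl⟩
      have hmaxcnt : ((PySem.Set.ofList arr).map (fun k => (k, (arr.count k : Int)))).foldl
            (fun (m : Int) (p : Int × Int) => max m p.2) 0
          = (PySem.List.max? ((PySem.Set.ofList arr).map (fun k => (arr.count k : Int)))
              (fun x => x)).getD 0 := by
        rw [List.foldl_map, hS, List.map_cons, PySem.List.max?_id_cons]
        rw [Option.getD_some, List.foldl_cons, max_eq_right (Int.natCast_nonneg _), List.foldl_map]
      -- the final "extra" terms agree
      have hextra : (PySem.Dict.counter arr).getD 0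
            (if (PySem.List.max? ((PySem.Set.ofList arr).map (fun k => (arr.count k : Int)))
                (fun x => x)).getD 0 > 1 then 1 else 0)
          = (if (PySem.List.count s 0 : Int) ≠ 0 then (PySem.List.count s 0 : Int)
              else (if dupList s ≠ [] then (1:Int) else 0)) := by
        rw [getD_counter_default]
        by_cases h0 : (0:Int) ∈ arr
        · rw [if_pos h0]
          have hzpos : List.count (0:Int) arr ≠ 0 :=
            Nat.pos_iff_ne_zero.mp (List.count_pos_iff.mpr h0)
          simp [PySem.List.count_eq, hperm.count_eq 0, hzpos]
        · rw [if_neg h0]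
          have hz0 : List.count (0:Int) s = 0 := by
            rw [hperm.count_eq]
            exact List.count_eq_zero_of_not_mem h0
          by_cases hnd : arr.Nodup
          · have hnds : s.Nodup := hperm.nodup_iff.mpr hnd
            have h1 : ¬ (1 < (PySem.List.max? ((PySem.Set.ofList arr).map
                (fun k => (arr.count k : Int))) (fun x => x)).getD 0) :=
              fun h => (maxcnt_gt_one_iff arr).mp h hnd
            have h2 : ¬ dupList s ≠ [] := fun h => (dupList_ne_nil_iff s hpw).mp h hnds
            simp [PySem.List.count_eq, hz0, h1, h2]
          · have hnds : ¬ s.Nodup := fun h => hnd (hperm.nodup_iff.mp h)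
            have h1 : 1 < (PySem.List.max? ((PySem.Set.ofList arr).map
                (fun k => (arr.count k : Int))) (fun x => x)).getD 0 :=
              (maxcnt_gt_one_iff arr).mpr hnd
            have h2 : dupList s ≠ [] := (dupList_ne_nil_iff s hpw).mpr hnds
            simp [PySem.List.count_eq, hz0, h1, h2]
      -- assemble both sides
      have hgzNZ : ¬ ((PySem.Set.ofList arr).filter (fun k => k != 0)).foldl
          (fun g x => ((Int.gcd g x : Int))) 0 = 0 := by
        rw [← hgcdB]; exact hgz
      simp only [len2, len2_alt, if_neg hnil, if_neg hz, ← hsdef,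
        hitems, hgcdA, hgcdB, hlastmax]
      rw [PySem.List.foldl_prod_mk
        (f := fun (a : Int) (p : Int × Int) => if p.1 ≠ 0 then a + p.2 - 1 else a)
        (g := fun (m : Int) (p : Int × Int) => max m p.2)]
      rw [hsum, hmaxcnt, hextra, hdup, if_neg hgzNZ]

-- ===== VERDICT (by name: the statement is the Claim_ definition above) =====
theorem len2_spec : Claim_equal_len2 := by
  intro arr _
  unfold Spec_len2
  exact len2_main arr
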